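-- pv_equiv track=rewrite | github.com/diangeli/AISynthesizer | src/lstm/processing.py | clean_midi_notes
-- ===== SOURCE A (Python) =====
-- def clean_midi_notes(midi_note_strings):
--     max_zero_sequence_length = 3
--     cleaned_notes = []
--     for note in midi_note_strings:
--         corrected_note = note
--         invalid_sequence = "0" * (max_zero_sequence_length + 1)
--
--         while invalid_sequence in corrected_note:
--             corrected_note = corrected_note.replace(invalid_sequence, "0")
--
--         cleaned_notes.append(corrected_note)
--
--     return cleaned_notes
-- ===== SOURCE B (Python) =====
-- def clean_midi_notes(midi_note_strings):
--     def collapse(s):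
--         parts = []
--         i, n = 0, len(s)
--         while i < n:
--             c = s[i]
--             if c == '0':
--                 j = i + 1
--                 while j < n and s[j] == '0':
--                     j += 1
--                 k = j - i
--                 while k >= 4:
--                     k -= 3 * (k // 4)
--                 parts.append('0' * k)
--                 i = j
--             else:
--                 parts.append(c)
--                 i += 1
--         return ''.join(parts)
--     return [collapse(s) for s in midi_note_strings]
-- ===== Notes on version B (the rewrite author's own statement) =====
-- stated objective: alternative
-- what changed: Replaces A's repeated whole-string replace('0000','0') passes with a single left-to-right scan that collapses each maximal zero-run at once via the recurrence k -> k - 3*floor(k/4).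
import Mathlib
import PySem

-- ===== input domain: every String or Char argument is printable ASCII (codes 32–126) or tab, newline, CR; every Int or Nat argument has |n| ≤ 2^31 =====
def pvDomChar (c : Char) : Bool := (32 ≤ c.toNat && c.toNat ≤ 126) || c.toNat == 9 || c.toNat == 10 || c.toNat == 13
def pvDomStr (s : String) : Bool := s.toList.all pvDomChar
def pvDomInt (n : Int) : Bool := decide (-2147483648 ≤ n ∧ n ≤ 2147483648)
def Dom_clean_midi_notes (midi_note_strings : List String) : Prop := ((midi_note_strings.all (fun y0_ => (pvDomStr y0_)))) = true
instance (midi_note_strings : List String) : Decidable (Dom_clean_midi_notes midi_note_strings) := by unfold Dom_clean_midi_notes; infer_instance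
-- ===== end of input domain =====

-- B replaces A's repeated global '0000'→'0' replace with one pass over the maximal
-- zero-runs, collapsing each run of length k via the recurrence k → k - 3⌊k/4⌋ (alternative
-- single-pass algorithm; return values are identical).

-- ===== PORT A =====
-- `rep` is a run-free recursive characterization of Python's s.replace("0000","0");
-- the port's while-loop (`whileA`) cites `replace_eq_rep`/`rep_length_lt` for termination.
def rep : List Char → List Char
  | [] => []
  | c :: t =>
    if ['0','0','0','0'].isPrefixOf (c :: t) then '0' :: rep ((c :: t).drop 4)
    else c :: rep t
termination_by s => s.length
decreasing_by all_goals (simp; try omega)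

theorem replace_eq_rep_aux (fuel : Nat) (l acc : List Char) (h : l.length ≤ fuel) :
    PySem.Chars.replace.go ['0','0','0','0'] ['0'] fuel l acc = acc.reverse ++ rep l := by
  induction fuel generalizing l acc with
  | zero =>
    have : l = [] := by cases l <;> simp_all
    subst this
    simp [PySem.Chars.replace.go, rep]
  | succ n ih =>
    cases l with
    | nil => simp [PySem.Chars.replace.go, rep]
    | cons c t =>
      rw [PySem.Chars.replace.go]
      by_cases hp : ['0','0','0','0'].isPrefixOf (c :: t)
      · rw [if_pos hp, ih _ _ (by simp at h ⊢; omega), rep, if_pos hp]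
        simp
      · rw [if_neg hp, ih _ _ (by simp at h ⊢; omega), rep, if_neg hp]
        simp

theorem replace_eq_rep (s : List Char) :
    PySem.Chars.replace s ['0','0','0','0'] ['0'] = rep s := by
  rw [PySem.Chars.replace]
  simpa using replace_eq_rep_aux s.length s [] le_rfl

theorem rep_length_le (s : List Char) : (rep s).length ≤ s.length := by
  fun_induction rep with
  | case1 => simp
  | case2 c t hp ih =>
    have hlen : 4 ≤ (c :: t).length := by
      simpa using (List.isPrefixOf_iff_prefix.mp hp).length_le
    simp only [List.length_cons, List.length_drop] at *
    omega
  | case3 c t hp ih => simp; omega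

theorem rep_length_lt (s : List Char) (h : ['0','0','0','0'] <:+: s) :
    (rep s).length < s.length := by
  fun_induction rep with
  | case1 => simp at h
  | case2 c t hp ih =>
    have hlen : 4 ≤ (c :: t).length := by
      simpa using (List.isPrefixOf_iff_prefix.mp hp).length_le
    have h2 := rep_length_le ((c :: t).drop 4)
    simp only [List.length_cons, List.length_drop] at *
    omega
  | case3 c t hp ih =>
    have ht : ['0','0','0','0'] <:+: t := by
      rcases List.infix_cons_iff.mp h with h' | h'
      · exact absurd (List.isPrefixOf_iff_prefix.mpr h') hp
      · exact h'
    have := ih ht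
    simp only [List.length_cons] at *
    omega

-- A's while-loop: while "0000" in s: s = s.replace("0000", "0")
def whileA (s : List Char) : List Char :=
  if PySem.Chars.isIn ['0','0','0','0'] s then
    whileA (PySem.Chars.replace s ['0','0','0','0'] ['0'])
  else s
termination_by s.length
decreasing_by
  rw [replace_eq_rep]
  exact rep_length_lt s ((PySem.Chars.isIn_iff_infix _ _).mp (by assumption))

def clean_midi_notes (midi_note_strings : List String) : List String :=
  midi_note_strings.foldl
    (fun cleaned_notes note => cleaned_notes ++ [String.ofList (whileA note.toList)]) []

-- ===== PORT B =====
-- leading-zero count of the current run (B's inner `while j < n and s[j] == '0'` scan)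
def lz : List Char → Nat
  | [] => 0
  | c :: t => if c = '0' then lz t + 1 else 0

-- B's `while k >= 4: k -= 3 * (k // 4)`
def shrink (k : Nat) : Nat :=
  if 4 ≤ k then shrink (k - 3 * (k / 4)) else k
termination_by k
decreasing_by omega

-- B's outer scan: copy non-'0' chars, collapse each maximal zero-run at once
def goB : List Char → List Char
  | [] => []
  | c :: t =>
    if c = '0' then
      List.replicate (shrink (lz t + 1)) '0' ++ goB (t.drop (lz t))
    else c :: goB t
termination_by s => s.length
decreasing_by all_goals (simp; try omega)

def clean_midi_notes_alt (midi_note_strings : List String) : List String :=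
  midi_note_strings.map (fun s => String.ofList (goB s.toList))

-- ===== PRECONDITION & SPEC =====
def Spec_clean_midi_notes (midi_note_strings : List String) (out : List String) : Prop := out = clean_midi_notes_alt midi_note_strings
instance (midi_note_strings : List String) (out : List String) : Decidable (Spec_clean_midi_notes midi_note_strings out) := by unfold Spec_clean_midi_notes; infer_instance

-- ===== CLAIM (what is proved, stated in full; the proofs are below) =====
def Claim_equal_clean_midi_notes : Prop := ∀ (midi_note_strings : List String), Dom_clean_midi_notes midi_note_strings → Spec_clean_midi_notes midi_note_strings (clean_midi_notes midi_note_strings)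

-- ===== LEMMAS AND PROOFS =====
theorem lz_replicate_append (k : Nat) (r : List Char) :
    lz (List.replicate k '0' ++ r) = k + lz r := by
  induction k with
  | zero => simp
  | succ n ih => simp [List.replicate_succ, lz, ih]; omega

theorem take_lz (s : List Char) : s = List.replicate (lz s) '0' ++ s.drop (lz s) := by
  induction s with
  | nil => simp [lz]
  | cons c t ih =>
    by_cases hc : c = '0'
    · subst hc; rw [lz]; simp [List.replicate_succ]; exact ih
    · simp [lz, hc]

theorem lz_drop_lz (s : List Char) : lz (s.drop (lz s)) = 0 := by
  induction s with
  | nil => simp [lz]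
  | cons c t ih =>
    by_cases hc : c = '0'
    · subst hc; rw [lz]; simpa using ih
    · simp [lz, hc]

theorem zeros_prefix_iff (n : Nat) (s : List Char) :
    List.replicate n '0' <+: s ↔ n ≤ lz s := by
  induction n generalizing s with
  | zero => simp
  | succ m ih =>
    cases s with
    | nil => simp [List.replicate_succ, lz]
    | cons c t =>
      rw [List.replicate_succ]
      constructor
      · rintro ⟨u, hu⟩
        simp at hu
        obtain ⟨hc, hrest⟩ := hu
        subst hc
        have : List.replicate m '0' <+: t := ⟨u, hrest⟩
        rw [lz]; simp
        have := (ih t).mp this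
        omega
      · intro h
        rw [lz] at h
        by_cases hc : c = '0'
        · subst hc
          simp at h
          have : m ≤ lz t := by omega
          obtain ⟨u, hu⟩ := (ih t).mpr this
          exact ⟨u, by simp [hu]⟩
        · simp [hc] at h

theorem goB_replicate (k : Nat) (r : List Char) (hr : lz r = 0) :
    goB (List.replicate k '0' ++ r) = List.replicate (shrink k) '0' ++ goB r := by
  cases k with
  | zero => simp [shrink]
  | succ m =>
    rw [List.replicate_succ, List.cons_append, goB]
    simp only [lz_replicate_append, hr]
    rw [List.drop_append_of_le_length (by simp)]
    simp

theorem prefix4_iff (s : List Char) :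
    ['0','0','0','0'].isPrefixOf s = true ↔ 4 ≤ lz s := by
  rw [List.isPrefixOf_iff_prefix]
  have : (['0','0','0','0'] : List Char) = List.replicate 4 '0' := rfl
  rw [this, zeros_prefix_iff]

theorem lz_rep_zero (r : List Char) (hr : lz r = 0) : lz (rep r) = 0 := by
  cases r with
  | nil => simp [rep, lz]
  | cons c t =>
    rw [lz] at hr
    by_cases hc : c = '0'
    · simp [hc] at hr
    · rw [rep, if_neg (by
        intro hp
        have := (prefix4_iff _).mp hp
        rw [lz, if_neg hc] at this
        omega)]
      rw [lz, if_neg hc]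

theorem rep_replicate (k : Nat) (r : List Char) (hr : lz r = 0) :
    rep (List.replicate k '0' ++ r) = List.replicate (k - 3 * (k / 4)) '0' ++ rep r := by
  induction k using Nat.strong_induction_on with
  | _ k ih =>
    by_cases h4 : 4 ≤ k
    · have hdecomp : List.replicate k '0' ++ r =
        '0' :: (List.replicate (k - 1) '0' ++ r) := by
        cases k with
        | zero => omega
        | succ m => simp [List.replicate_succ]
      rw [hdecomp, rep, if_pos (by
        rw [prefix4_iff, ← hdecomp, lz_replicate_append, hr]; omega)]
      have hdrop : ('0' :: (List.replicate (k - 1) '0' ++ r)).drop 4 =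
          List.replicate (k - 4) '0' ++ r := by
        simp only [List.drop_succ_cons]
        rw [List.drop_append_of_le_length (by simp; omega)]
        rw [List.drop_replicate]
        congr 1
      rw [hdrop, ih (k - 4) (by omega) ]
      rw [← List.cons_append, ← List.replicate_succ]
      congr 2
      omega
    · have : k - 3 * (k / 4) = k := by omega
      rw [this]
      cases k with
      | zero => simp
      | succ m =>
        rw [List.replicate_succ, List.cons_append, rep, if_neg (by
          rw [prefix4_iff, ← List.cons_append, ← List.replicate_succ,
            lz_replicate_append, hr]
          omega)]
        have : rep (List.replicate m '0' ++ r) =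
            List.replicate (m - 3 * (m / 4)) '0' ++ rep r := ih m (by omega)
        rw [this]
        have hm : m - 3 * (m / 4) = m := by omega
        rw [hm, ← List.cons_append, ← List.replicate_succ]

theorem shrink_g (k : Nat) : shrink (k - 3 * (k / 4)) = shrink k := by
  by_cases h4 : 4 ≤ k
  · conv_rhs => rw [shrink, if_pos h4]
  · have h : k - 3 * (k / 4) = k := by omega
    rw [h]

theorem goB_rep_aux (n : Nat) : ∀ s : List Char, s.length ≤ n → goB (rep s) = goB s := by
  induction n with
  | zero =>
    intro s hs
    have : s = [] := by cases s <;> simp_all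
    subst this; rw [rep]
  | succ m ih =>
    intro s hs
    rcases Nat.eq_zero_or_pos (lz s) with h0 | hpos
    · cases s with
      | nil => rw [rep]
      | cons c t =>
        rw [lz] at h0
        by_cases hc : c = '0'
        · simp [hc] at h0
        · rw [rep, if_neg (by
            intro hp
            have := (prefix4_iff _).mp hp
            rw [lz, if_neg hc] at this; omega)]
          rw [goB, if_neg hc, goB, if_neg hc]
          rw [ih t (by simp at hs; omega)]
    · set k := lz s with hk
      set r := s.drop k with hr
      have hdecomp : s = List.replicate k '0' ++ r := take_lz s
      have hr0 : lz r = 0 := lz_drop_lz s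
      have hrlen : r.length ≤ m := by
        rw [hdecomp] at hs
        simp at hs
        omega
      rw [hdecomp, rep_replicate k r hr0,
        goB_replicate _ _ (lz_rep_zero r hr0),
        goB_replicate _ _ hr0, shrink_g, ih r hrlen]

theorem goB_rep (s : List Char) : goB (rep s) = goB s :=
  goB_rep_aux s.length s le_rfl

theorem goB_of_no_quad_aux (n : Nat) :
    ∀ s : List Char, s.length ≤ n → ¬ (['0','0','0','0'] <:+: s) → goB s = s := by
  induction n with
  | zero =>
    intro s hs _
    have : s = [] := by cases s <;> simp_all
    subst this; rw [goB]
  | succ m ih =>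
    intro s hs hinf
    rcases Nat.eq_zero_or_pos (lz s) with h0 | hpos
    · cases s with
      | nil => rw [goB]
      | cons c t =>
        rw [lz] at h0
        by_cases hc : c = '0'
        · simp [hc] at h0
        · rw [goB, if_neg hc]
          rw [ih t (by simp at hs; omega)
            (fun h => hinf (h.trans (List.infix_cons_iff.mpr (Or.inr (List.infix_refl t)))))]
    · set k := lz s with hk
      set r := s.drop k with hr
      have hdecomp : s = List.replicate k '0' ++ r := take_lz s
      have hr0 : lz r = 0 := lz_drop_lz s
      have hk4 : k < 4 := by
        by_contra hge
        exact hinf (((zeros_prefix_iff 4 s).mpr (by omega)).isInfix)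
      have hrinf : ¬ (['0','0','0','0'] <:+: r) := by
        intro h
        exact hinf (h.trans ⟨List.replicate k '0', [], by simp [← hdecomp]⟩)
      have hrlen : r.length ≤ m := by
        rw [hdecomp] at hs; simp at hs; omega
      have hsk : shrink k = k := by rw [shrink, if_neg (by omega)]
      conv_lhs => rw [hdecomp]
      rw [goB_replicate _ _ hr0, hsk, ih r hrlen hrinf, ← hdecomp]

theorem whileA_eq_goB (s : List Char) : whileA s = goB s := by
  induction s using (measure List.length).wf.induction with
  | _ s ih =>
    rw [whileA]
    by_cases h : PySem.Chars.isIn ['0','0','0','0'] s = true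
    · rw [if_pos h, replace_eq_rep]
      have hlt : (rep s).length < s.length :=
        rep_length_lt s ((PySem.Chars.isIn_iff_infix _ _).mp h)
      rw [ih (rep s) hlt, goB_rep]
    · rw [if_neg h]
      exact (goB_of_no_quad_aux s.length s le_rfl
        ((PySem.Chars.isIn_eq_false_iff _ _).mp (Bool.eq_false_iff.mpr h))).symm

-- ===== VERDICT (by name: the statement is the Claim_ definition above) =====
theorem clean_midi_notes_spec : Claim_equal_clean_midi_notes := by
  intro midi_note_strings _
  unfold Spec_clean_midi_notes clean_midi_notes clean_midi_notes_alt
  rw [PySem.List.foldl_append_singleton_eq_map]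
  simp only [List.nil_append]
  exact List.map_congr_left (fun s _ => by rw [whileA_eq_goB])
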